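-- pv_equiv track=rewrite | github.com/aanickelson/osu_semantic_mapping | test_src/gather_edge_data.py | what_node
-- ===== SOURCE A (Python) =====
-- def what_node(nodes_dict, loc):
--     """
--    Door nodes are checked first - they are within the bounds of rooms / halls so doors must supersede other areas
--
--     Args:
--         p: parameters
--         loc: current x, y location to check
--
--     Returns:
--         node the robot is currently in
--
--     """
--
--     # Loop through once for doors
--     for node in nodes_dict:
--         if 'd' in node:
--             if loc[0] in nodes_dict[node][0] and loc[1] in nodes_dict[node][1]:
--                 return node
--
--     # Loop through a second time for all other areas
--     for node in nodes_dict: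
--         if 'd' in node:
--             continue
--         else:
--             if loc[0] in nodes_dict[node][0] and loc[1] in nodes_dict[node][1]:
--                 return node
--
--     raise ValueError('Robot is out of this world')
-- ===== SOURCE B (Python) =====
-- def what_node(nodes_dict, loc):
--     """Single pass over nodes_dict: return the first matching door immediately;
--     remember the first matching non-door as a fallback; doors win."""
--     fallback = None
--     for node in nodes_dict:
--         if loc[0] in nodes_dict[node][0] and loc[1] in nodes_dict[node][1]:
--             if 'd' in node:
--                 return node
--             if fallback is None:
--                 fallback = node
--     if fallback is not None:
--         return fallback
--     raise ValueError('Robot is out of this world')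
-- ===== Notes on version B (the rewrite author's own statement) =====
-- stated objective: simpler
-- what changed: Replaces A's two full passes over nodes_dict (doors first, then non-doors) with a single pass that returns a matching door immediately and keeps the first non-door match in a fallback variable; Pre_ excludes the inputs where no region contains loc, on which both A and B raise ValueError.
import Mathlib
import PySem

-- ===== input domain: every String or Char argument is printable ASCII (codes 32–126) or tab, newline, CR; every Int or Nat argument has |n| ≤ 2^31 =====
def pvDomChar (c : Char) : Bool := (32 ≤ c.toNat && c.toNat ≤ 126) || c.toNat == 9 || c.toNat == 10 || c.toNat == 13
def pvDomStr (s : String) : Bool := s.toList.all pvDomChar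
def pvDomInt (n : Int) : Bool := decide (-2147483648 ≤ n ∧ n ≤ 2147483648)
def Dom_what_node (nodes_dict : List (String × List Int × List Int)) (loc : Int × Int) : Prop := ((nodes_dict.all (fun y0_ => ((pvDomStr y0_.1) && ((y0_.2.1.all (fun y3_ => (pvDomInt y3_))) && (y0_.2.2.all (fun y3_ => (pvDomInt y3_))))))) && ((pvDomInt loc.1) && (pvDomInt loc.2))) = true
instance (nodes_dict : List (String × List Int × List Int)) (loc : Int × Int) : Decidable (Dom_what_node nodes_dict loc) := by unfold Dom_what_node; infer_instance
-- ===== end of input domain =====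

-- B replaces A's two passes (doors, then non-doors) by ONE pass with a fallback variable; return value only.

-- ===== PORT A =====
-- nodes_dict[node]: first-match lookup in the association list (keys come from the list, so the default is unreachable)
def wnGet (d : List (String × List Int × List Int)) (k : String) : List Int × List Int :=
  match d with
  | [] => ([], [])
  | (k', v) :: rest => if k' == k then v else wnGet rest k

-- does loc fall in node k's region?
def wnMatch (d : List (String × List Int × List Int)) (k : String) (loc : Int × Int) : Bool :=
  (wnGet d k).1.contains loc.1 && (wnGet d k).2.contains loc.2

-- first loop of A: doors only
def wnPass1 (d : List (String × List Int × List Int)) (loc : Int × Int) : List String → Option String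
  | [] => none
  | k :: ks =>
    if PySem.Str.isIn "d" k then
      if wnMatch d k loc then some k else wnPass1 d loc ks
    else wnPass1 d loc ks

-- second loop of A: non-doors
def wnPass2 (d : List (String × List Int × List Int)) (loc : Int × Int) : List String → Option String
  | [] => none
  | k :: ks =>
    if PySem.Str.isIn "d" k then wnPass2 d loc ks
    else if wnMatch d k loc then some k else wnPass2 d loc ks

-- the final 'raise ValueError' is out of the String type: Pre_what_node excludes it and the port returns ""
def what_node (nodes_dict : List (String × List Int × List Int)) (loc : Int × Int) : String :=
  match wnPass1 nodes_dict loc (nodes_dict.map Prod.fst) with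
  | some k => k
  | none =>
    match wnPass2 nodes_dict loc (nodes_dict.map Prod.fst) with
    | some k => k
    | none => ""

-- ===== PORT B =====
-- single loop carrying the fallback (first non-door match); a matching door returns at once
def wnLoopB (d : List (String × List Int × List Int)) (loc : Int × Int) :
    List String → Option String → Option String
  | [], fb => fb
  | k :: ks, fb =>
    if wnMatch d k loc then
      if PySem.Str.isIn "d" k then some k
      else wnLoopB d loc ks (if fb = none then some k else fb)
    else wnLoopB d loc ks fb

-- the final 'raise ValueError' is out of the String type: Pre_what_node excludes it and the port returns ""
def what_node_alt (nodes_dict : List (String × List Int × List Int)) (loc : Int × Int) : String :=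
  match wnLoopB nodes_dict loc (nodes_dict.map Prod.fst) none with
  | some k => k
  | none => ""

-- ===== PRECONDITION & SPEC =====
-- Pre_ excludes exactly the inputs on which Python A (and B) raise ValueError: no node region contains loc
def Pre_what_node (nodes_dict : List (String × List Int × List Int)) (loc : Int × Int) : Prop :=
  ∃ p ∈ nodes_dict, ∀ v, (nodes_dict.lookup p.1) = some v →
    loc.1 ∈ v.1 ∧ loc.2 ∈ v.2
instance (nodes_dict : List (String × List Int × List Int)) (loc : Int × Int) : Decidable (Pre_what_node nodes_dict loc) := by unfold Pre_what_node; infer_instance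

def pvWitness_what_node : (List (String × List Int × List Int)) × (Int × Int) :=
  ([("room1", ([0, 1], [0, 1])), ("d1", ([1], [1]))], (1, 1))

def Spec_what_node (nodes_dict : List (String × List Int × List Int)) (loc : Int × Int) (out : String) : Prop := out = what_node_alt nodes_dict loc
instance (nodes_dict : List (String × List Int × List Int)) (loc : Int × Int) (out : String) : Decidable (Spec_what_node nodes_dict loc out) := by unfold Spec_what_node; infer_instance

-- ===== CLAIM (what is proved, stated in full; the proofs are below) =====
def Claim_equal_what_node : Prop := ∀ (nodes_dict : List (String × List Int × List Int)) (loc : Int × Int), Dom_what_node nodes_dict loc → Pre_what_node nodes_dict loc → Spec_what_node nodes_dict loc (what_node nodes_dict loc)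

-- ===== LEMMAS AND PROOFS =====

-- B's loop equals: first door match, else the incoming fallback, else first non-door match
theorem wnLoopB_eq (d : List (String × List Int × List Int)) (loc : Int × Int)
    (ks : List String) (fb : Option String) :
    wnLoopB d loc ks fb =
      ((wnPass1 d loc ks).or (fb.or (wnPass2 d loc ks))) := by
  induction ks generalizing fb with
  | nil => simp [wnLoopB, wnPass1, wnPass2]
  | cons k ks ih =>
    simp only [wnLoopB, wnPass1, wnPass2]
    by_cases hm : wnMatch d k loc = true <;>
      by_cases hd : PySem.Chars.isIn ['d'] k.toList = true <;>
        simp [hm, hd, ih] <;> cases fb <;> cases h1 : wnPass1 d loc ks <;> simp [h1]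

theorem what_node_spec : Claim_equal_what_node := by
  intro nodes_dict loc _ _
  unfold Spec_what_node what_node what_node_alt
  rw [wnLoopB_eq]
  cases h1 : wnPass1 nodes_dict loc (nodes_dict.map Prod.fst) <;>
    cases h2 : wnPass2 nodes_dict loc (nodes_dict.map Prod.fst) <;>
      simp [Option.or]
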